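-- pv_equiv track=rewrite | github.com/saharc2000/NLP_Construct-State_Classifier | Vectors.py | make_vector5
-- ===== SOURCE A (Python) =====
-- def find_dep_in_dict_list(sentence, target):
--     for word_dict in sentence:
--         if target in word_dict.get("word"):
--             return word_dict.get("dep_func")
--     return "err"  # Return -1 if the target string is not found
--
-- def make_vector5(smixut_list, unique_dep_func,sentences):
--     vector_type5 = []
--     i=0
--     for smixut in smixut_list:
--         if(i >= len(sentences)):
--             break
--         word1, word2 = smixut.split(' ', 1)
--         dep_word1 = find_dep_in_dict_list(sentences[i], word1)
--         dep_word2 = find_dep_in_dict_list(sentences[i], word2)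
--         # find_token_info()
--         vector = [0] * len(unique_dep_func)
--         # complete get_lex
--         if(dep_word1 != "err"):
--             vector[unique_dep_func[dep_word1]] = 1
--         if (dep_word2 != "err"):
--             vector[unique_dep_func[dep_word2]] = 1
--         vector_type5.append(vector)
--         i += 1
--     return vector_type5
-- ===== SOURCE B (Python) =====
-- def make_vector5(smixut_list, unique_dep_func, sentences):
--     vector_type5 = []
--     for smixut, sentence in zip(smixut_list, sentences):
--         word1, word2 = smixut.split(' ', 1)
--         found1 = found2 = False
--         dep1 = dep2 = "err"
--         for word_dict in sentence:
--             w = word_dict.get("word")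
--             if not found1 and word1 in w:
--                 found1, dep1 = True, word_dict.get("dep_func")
--             if not found2 and word2 in w:
--                 found2, dep2 = True, word_dict.get("dep_func")
--         vector = [0] * len(unique_dep_func)
--         if dep1 != "err":
--             vector[unique_dep_func[dep1]] = 1
--         if dep2 != "err":
--             vector[unique_dep_func[dep2]] = 1
--         vector_type5.append(vector)
--     return vector_type5
-- ===== Notes on version B (the rewrite author's own statement) =====
-- stated objective: alternative
-- what changed: Replaces the manual counter with break and the helper called twice (two independent scans per sentence) by zip(smixut_list, sentences) and a single combined pass that maintains (found, dep) state for both words at once.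
import Mathlib
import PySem

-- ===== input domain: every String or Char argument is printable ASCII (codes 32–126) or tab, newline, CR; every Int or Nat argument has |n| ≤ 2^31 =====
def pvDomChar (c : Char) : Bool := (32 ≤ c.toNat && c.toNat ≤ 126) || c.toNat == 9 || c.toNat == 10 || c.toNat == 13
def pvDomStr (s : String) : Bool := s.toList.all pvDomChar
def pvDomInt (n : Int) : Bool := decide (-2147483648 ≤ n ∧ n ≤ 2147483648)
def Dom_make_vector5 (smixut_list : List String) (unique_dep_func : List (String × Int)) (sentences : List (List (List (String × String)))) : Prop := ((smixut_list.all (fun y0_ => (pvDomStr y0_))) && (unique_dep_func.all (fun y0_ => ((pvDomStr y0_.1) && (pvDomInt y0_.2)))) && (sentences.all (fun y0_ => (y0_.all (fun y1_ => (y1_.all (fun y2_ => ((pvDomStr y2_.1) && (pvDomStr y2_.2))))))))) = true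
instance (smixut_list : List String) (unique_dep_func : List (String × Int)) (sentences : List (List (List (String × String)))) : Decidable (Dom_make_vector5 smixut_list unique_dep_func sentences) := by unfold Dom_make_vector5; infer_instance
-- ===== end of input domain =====

-- B replaces A's manual counter/break and twice-called helper (two scans per sentence) by
-- zip(smixut_list, sentences) and a single combined pass carrying (found, dep) state for both words.


-- Python's `t in w` substring test on strings (exact: list-infix on the characters).
def pvIn (t w : String) : Bool := decide (t.toList.IsInfix w.toList)

-- ===== PORT A =====
-- `target in word_dict.get("word")`: a dict missing "word" makes Python raise TypeError
-- (excluded by Pre_); the port reads it with default "".  A found dict missing "dep_func"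
-- gives Python None (leading to a KeyError later, excluded by Pre_); the port defaults to "err".
def find_dep_in_dict_list (sentence : List (List (String × String))) (target : String) : String :=
  match sentence with
  | [] => "err"
  | wd :: rest =>
    if pvIn target ((PySem.Dict.mk wd).getD "word" "") then
      (PySem.Dict.mk wd).getD "dep_func" "err"
    else find_dep_in_dict_list rest target

-- the for-loop of A, with its counter i and the `i >= len(sentences)` break
def mv5_loop (unique_dep_func : List (String × Int)) (sentences : List (List (List (String × String)))) :
    List String → Nat → List (List Int) → List (List Int)
  | [], _, acc => acc
  | smixut :: rest, i, acc =>
    if sentences.length ≤ i then acc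
    else
      -- word1, word2 = smixut.split(' ', 1); missing ' ' (Python ValueError) is excluded by Pre_
      let parts := (PySem.Str.splitMax? smixut " " 1).getD []
      let word1 := PySem.List.pyGetD parts 0 ""
      let word2 := PySem.List.pyGetD parts 1 ""
      let s := PySem.List.pyGetD sentences (i : Int) []
      let dep_word1 := find_dep_in_dict_list s word1
      let dep_word2 := find_dep_in_dict_list s word2
      let vector := List.replicate unique_dep_func.length (0 : Int)
      let vector := if dep_word1 ≠ "err" then PySem.List.pySetD vector ((PySem.Dict.mk unique_dep_func).getD dep_word1 0) 1 else vector
      let vector := if dep_word2 ≠ "err" then PySem.List.pySetD vector ((PySem.Dict.mk unique_dep_func).getD dep_word2 0) 1 else vector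
      mv5_loop unique_dep_func sentences rest (i + 1) (acc ++ [vector])

def make_vector5 (smixut_list : List String) (unique_dep_func : List (String × Int)) (sentences : List (List (List (String × String)))) : List (List Int) :=
  mv5_loop unique_dep_func sentences smixut_list 0 []

-- ===== PORT B =====
-- one combined pass: state (found1, dep1, found2, dep2); `w = word_dict.get("word")` is only
-- consumed by `in` when the corresponding word is still unfound (short-circuit), read with default ""
def pvStepB (word1 word2 : String) (st : Bool × String × Bool × String) (wd : List (String × String)) : Bool × String × Bool × String :=
  let w := (PySem.Dict.mk wd).getD "word" ""
  let st1 := if !st.1 && pvIn word1 w then (true, (PySem.Dict.mk wd).getD "dep_func" "err", st.2.2.1, st.2.2.2) else st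
  if !st1.2.2.1 && pvIn word2 w then (st1.1, st1.2.1, true, (PySem.Dict.mk wd).getD "dep_func" "err") else st1

def make_vector5_alt (smixut_list : List String) (unique_dep_func : List (String × Int)) (sentences : List (List (List (String × String)))) : List (List Int) :=
  (smixut_list.zip sentences).map (fun p =>
    let parts := (PySem.Str.splitMax? p.1 " " 1).getD []
    let word1 := PySem.List.pyGetD parts 0 ""
    let word2 := PySem.List.pyGetD parts 1 ""
    let st := p.2.foldl (pvStepB word1 word2) (false, "err", false, "err")
    let vector := List.replicate unique_dep_func.length (0 : Int)
    let vector := if st.2.1 ≠ "err" then PySem.List.pySetD vector ((PySem.Dict.mk unique_dep_func).getD st.2.1 0) 1 else vector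
    let vector := if st.2.2.2 ≠ "err" then PySem.List.pySetD vector ((PySem.Dict.mk unique_dep_func).getD st.2.2.2 0) 1 else vector
    vector)

-- ===== PRECONDITION & SPEC =====
-- first dict whose (present) "word" value contains t
def pvMatches (t : String) (wd : List (String × String)) : Bool :=
  match (PySem.Dict.mk wd).get? "word" with
  | some w => pvIn t w
  | none => false

-- the matched dict must carry "dep_func", and unless its value is the sentinel "err" it must be a
-- key of unique_dep_func whose index is in range for the one-hot vector (else Python raises)
def pvDepOk (unique_dep_func : List (String × Int)) (wd : List (String × String)) : Bool :=
  match (PySem.Dict.mk wd).get? "dep_func" with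
  | none => false
  | some dep =>
    dep == "err" ||
      (match (PySem.Dict.mk unique_dep_func).get? dep with
       | none => false
       | some idx => decide (PySem.Raise.InRange unique_dep_func.length idx))

-- every dict scanned before the first match must have a "word" key (else `t in None` raises)
def pvScanOk (unique_dep_func : List (String × Int)) (sentence : List (List (String × String))) (t : String) : Bool :=
  ((sentence.takeWhile (fun wd => !(pvMatches t wd))).all (fun wd => ((PySem.Dict.mk wd).get? "word").isSome)) &&
    (match sentence.find? (pvMatches t) with
     | none => true
     | some wd => pvDepOk unique_dep_func wd)

def pvRowOk (unique_dep_func : List (String × Int)) (smixut : String) (sentence : List (List (String × String))) : Bool :=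
  smixut.toList.contains ' ' &&
  pvScanOk unique_dep_func sentence (String.ofList (smixut.toList.takeWhile (fun c => c ≠ ' '))) &&
  pvScanOk unique_dep_func sentence (String.ofList ((smixut.toList.dropWhile (fun c => c ≠ ' ')).drop 1))

-- Pre_ excludes exactly the inputs where the Python A raises: a smixut without ' ' paired with a
-- sentence (ValueError on unpacking), a dict without "word" reached before a word's first match
-- (TypeError on `in None`), a matched dict without "dep_func" / with a dep that is not a key of
-- unique_dep_func (KeyError), or a dep whose index is out of range for the vector (IndexError).
def Pre_make_vector5 (smixut_list : List String) (unique_dep_func : List (String × Int)) (sentences : List (List (List (String × String)))) : Prop :=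
  ((smixut_list.zip sentences).all (fun p => pvRowOk unique_dep_func p.1 p.2)) = true

instance (smixut_list : List String) (unique_dep_func : List (String × Int)) (sentences : List (List (List (String × String)))) : Decidable (Pre_make_vector5 smixut_list unique_dep_func sentences) := by unfold Pre_make_vector5; infer_instance

def pvWitness_make_vector5 : List String × (List (String × Int)) × (List (List (List (String × String)))) :=
  (["a b"], [("nsubj", 0), ("obj", 1)], [[[("word", "ab"), ("dep_func", "nsubj")], [("word", "b"), ("dep_func", "obj")]]])

def Spec_make_vector5 (smixut_list : List String) (unique_dep_func : List (String × Int)) (sentences : List (List (List (String × String)))) (out : List (List Int)) : Prop := out = make_vector5_alt smixut_list unique_dep_func sentences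
instance (smixut_list : List String) (unique_dep_func : List (String × Int)) (sentences : List (List (List (String × String)))) (out : List (List Int)) : Decidable (Spec_make_vector5 smixut_list unique_dep_func sentences out) := by unfold Spec_make_vector5; infer_instance

-- ===== CLAIM (what is proved, stated in full; the proofs are below) =====
def Claim_equal_make_vector5 : Prop := ∀ (smixut_list : List String) (unique_dep_func : List (String × Int)) (sentences : List (List (List (String × String)))), Dom_make_vector5 smixut_list unique_dep_func sentences → Pre_make_vector5 smixut_list unique_dep_func sentences → Spec_make_vector5 smixut_list unique_dep_func sentences (make_vector5 smixut_list unique_dep_func sentences)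

-- ===== LEMMAS AND PROOFS =====

-- first matched dep in `sentence`, with a fall-back d0 for "no match" (proof-only)
def pvFindD (sentence : List (List (String × String))) (t : String) (d0 : String) : String :=
  match sentence with
  | [] => d0
  | wd :: rest =>
    if pvIn t ((PySem.Dict.mk wd).getD "word" "") then (PySem.Dict.mk wd).getD "dep_func" "err"
    else pvFindD rest t d0

theorem pvFindD_err (sentence : List (List (String × String))) (t : String) :
    pvFindD sentence t "err" = find_dep_in_dict_list sentence t := by
  induction sentence with
  | nil => rfl
  | cons wd rest ih => simp only [pvFindD, find_dep_in_dict_list, ih]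

theorem passB_eq (w1 w2 : String) (sentence : List (List (String × String)))
    (f1 : Bool) (d1 : String) (f2 : Bool) (d2 : String) :
    sentence.foldl (pvStepB w1 w2) (f1, d1, f2, d2) =
      (f1 || sentence.any (fun wd => pvIn w1 ((PySem.Dict.mk wd).getD "word" "")),
       if f1 then d1 else pvFindD sentence w1 d1,
       f2 || sentence.any (fun wd => pvIn w2 ((PySem.Dict.mk wd).getD "word" "")),
       if f2 then d2 else pvFindD sentence w2 d2) := by
  induction sentence generalizing f1 d1 f2 d2 with
  | nil => simp [pvFindD]
  | cons wd rest ih =>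
    simp only [List.foldl_cons, List.any_cons, pvFindD]
    by_cases h1 : f1 = true <;> by_cases h2 : f2 = true <;>
      by_cases m1 : pvIn w1 ((PySem.Dict.mk wd).getD "word" "") = true <;>
      by_cases m2 : pvIn w2 ((PySem.Dict.mk wd).getD "word" "") = true <;>
      simp [pvStepB, h1, h2, m1, m2, ih]

theorem loopA_eq (unique_dep_func : List (String × Int)) (sentences : List (List (List (String × String))))
    (smixut_list : List String) (i : Nat) (acc : List (List Int)) :
    mv5_loop unique_dep_func sentences smixut_list i acc =
      acc ++ make_vector5_alt smixut_list unique_dep_func (sentences.drop i) := by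
  induction smixut_list generalizing i acc with
  | nil => simp [mv5_loop, make_vector5_alt]
  | cons smixut rest ih =>
    by_cases h : sentences.length ≤ i
    · rw [List.drop_eq_nil_of_le h]
      simp [mv5_loop, h, make_vector5_alt]
    · have hi : i < sentences.length := by omega
      rw [List.drop_eq_getElem_cons hi]
      simp only [mv5_loop, if_neg h, make_vector5_alt, List.zip_cons_cons, List.map_cons, ih,
        List.append_assoc, List.singleton_append]
      rw [PySem.List.pyGetD_natCast, List.getD_eq_getElem _ _ hi]
      rw [passB_eq, pvFindD_err, pvFindD_err]
      simp

-- ===== VERDICT (by name: the statement is the Claim_ definition above) =====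
theorem make_vector5_spec : Claim_equal_make_vector5 := by
  intro smixut_list unique_dep_func sentences _ _
  unfold Spec_make_vector5 make_vector5
  rw [loopA_eq]
  simp
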